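-- pv_equiv track=rewrite | github.com/mjw2705/Visual_fatigue | analysising_code/utils.py | count_blink
-- ===== SOURCE A (Python) =====
-- def count_blink(pupil_list, minu=None, quar=None):
--     # while -1 in pupil_list:
--     #     pupil_list.remove(-1)
--
--     # 전체 영상을 minu단위로 분석
--     if minu is not None:
--         time = minu * 1800  # 프레임수, 동공영상은 30fps
--         chunk = len(pupil_list) // time  # 입력받은 csv파일이 몇개의 분기로 나뉘는지
--     # 전체 영상을 quar개로 쪼개서 분석
--     if quar is not None:
--         time = len(pupil_list) // quar
--         chunk = quar
--
--     pupil_frame = []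
--     pupil_blink = []
--
--     if (chunk < 1):
--         pupil_frame.append(-1)
--         pupil_blink.append(-1)
--
--     for i in range(chunk):
--         # 눈 감은 프레임수 세기
--         count_frame = pupil_list[i * time:(i + 1) * time].count(0)
--         pupil_frame.append(count_frame)
--
--         # 눈 감은 횟수 세기
--         count = 0
--         for idx in range(time * i, time * (i + 1)):
--             if idx >= len(pupil_list):
--                 break
--             if pupil_list[idx] == 0 and pupil_list[idx - 1] != 0:
--                 count += 1  # 눈 깜빡임 count
--         pupil_blink.append(count)
--
--     return pupil_frame, pupil_blink
-- ===== SOURCE B (Python) =====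
-- def count_blink(pupil_list, minu=None, quar=None):
--     if minu is not None:
--         time = minu * 1800
--         chunk = len(pupil_list) // time
--     if quar is not None:
--         time = len(pupil_list) // quar
--         chunk = quar
--
--     if chunk < 1:
--         return [-1], [-1]
--
--     frames = [0] * chunk
--     blinks = [0] * chunk
--     limit = min(len(pupil_list), chunk * time)
--     for idx in range(limit):
--         if pupil_list[idx] == 0:
--             c = idx // time
--             frames[c] += 1
--             if pupil_list[idx - 1] != 0:
--                 blinks[c] += 1
--     return frames, blinks
-- ===== Notes on version B (the rewrite author's own statement) =====
-- stated objective: faster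
-- what changed: Replaces the per-chunk slice-.count(0) plus nested transition loop (which scans every frame twice and copies each chunk as a slice) by one flat pass over the truncated list that bins each frame into its chunk (idx//time) in two pre-sized arrays.
import Mathlib
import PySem

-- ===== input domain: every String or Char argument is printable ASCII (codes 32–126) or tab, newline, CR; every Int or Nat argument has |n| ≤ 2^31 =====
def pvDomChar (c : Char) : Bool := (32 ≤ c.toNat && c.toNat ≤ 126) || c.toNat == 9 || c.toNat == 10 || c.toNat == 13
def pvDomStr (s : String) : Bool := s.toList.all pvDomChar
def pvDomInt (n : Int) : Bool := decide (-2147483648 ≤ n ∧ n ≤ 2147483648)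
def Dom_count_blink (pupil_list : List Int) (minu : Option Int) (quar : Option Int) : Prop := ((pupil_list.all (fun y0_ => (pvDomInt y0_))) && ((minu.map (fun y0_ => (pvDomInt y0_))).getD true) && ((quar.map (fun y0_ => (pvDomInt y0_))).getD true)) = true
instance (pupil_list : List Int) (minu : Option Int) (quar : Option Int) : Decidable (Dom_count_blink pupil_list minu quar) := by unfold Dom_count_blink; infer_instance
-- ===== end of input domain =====

-- B replaces A's per-chunk slicing + nested transition loop by ONE flat pass over the
-- truncated list that bins each frame into its chunk (idx // time) in two pre-sized
-- arrays; objective: faster (no per-chunk slice copies or double scans; measured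
-- faster in a timing run). Return-value equivalence; neither program mutates its arguments.

-- ===== PORT A =====
-- shared setup lines of both Pythons: time/chunk from minu (quar overwrites);
-- none = the Python raises (NameError when both are None, ZeroDivisionError on a zero divisor)
def pvSetup (n : Int) (minu quar : Option Int) : Option (Int × Int) :=
  match minu, quar with
  | none, none => none
  | some m, none =>
      if m * 1800 = 0 then none else some (m * 1800, PySem.Int.floordiv n (m * 1800))
  | none, some q =>
      if q = 0 then none else some (PySem.Int.floordiv n q, q)
  | some m, some q =>
      if m * 1800 = 0 then none
      else if q = 0 then none else some (PySem.Int.floordiv n q, q)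

-- A's inner 'for idx in range(...)' with its break at len(pupil_list)
def pvBlinkLoop (p : List Int) : List Int → Int → Int
  | [], c => c
  | idx :: rest, c =>
    if (p.length : Int) ≤ idx then c
    else pvBlinkLoop p rest
      (if PySem.List.pyGetD p idx 1 = 0 ∧ PySem.List.pyGetD p (idx - 1) 0 ≠ 0 then c + 1 else c)

def count_blink (pupil_list : List Int) (minu : Option Int) (quar : Option Int) : List Int × List Int :=
  match pvSetup (pupil_list.length : Int) minu quar with
  | none => ([], [])  -- Python raises here; excluded by Pre_count_blink
  | some (time, chunk) =>
    let init : List Int × List Int := if chunk < 1 then ([-1], [-1]) else ([], [])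
    (PySem.List.pyRange 0 chunk 1).foldl
      (fun acc i =>
        let count_frame : Int :=
          (PySem.List.count (PySem.List.slice pupil_list (some (i * time)) (some ((i + 1) * time))) 0 : Nat)
        let count : Int :=
          pvBlinkLoop pupil_list (PySem.List.pyRange (time * i) (time * (i + 1)) 1) 0
        (acc.1 ++ [count_frame], acc.2 ++ [count]))
      init

-- ===== PORT B =====
def count_blink_alt (pupil_list : List Int) (minu : Option Int) (quar : Option Int) : List Int × List Int :=
  match pvSetup (pupil_list.length : Int) minu quar with
  | none => ([], [])  -- Python raises here; excluded by Pre_count_blink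
  | some (time, chunk) =>
    if chunk < 1 then ([-1], [-1])
    else
      let limit : Int := min (pupil_list.length : Int) (chunk * time)
      (List.range limit.toNat).foldl
        (fun acc (idx : Nat) =>
          if PySem.List.pyGetD pupil_list (idx : Int) 1 = 0 then
            let c := (PySem.Int.floordiv (idx : Int) time).toNat
            if PySem.List.pyGetD pupil_list ((idx : Int) - 1) 0 ≠ 0 then
              (acc.1.modify c (· + 1), acc.2.modify c (· + 1))
            else
              (acc.1.modify c (· + 1), acc.2)
          else acc)
        (List.replicate chunk.toNat 0, List.replicate chunk.toNat 0)

-- ===== PRECONDITION & SPEC =====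
-- Pre_ excludes exactly the inputs where A raises: both minu and quar None (NameError:
-- 'time'/'chunk' undefined), minu = 0 (ZeroDivisionError in len//time) or quar = 0
-- (ZeroDivisionError in len//quar).
def Pre_count_blink (pupil_list : List Int) (minu : Option Int) (quar : Option Int) : Prop :=
  minu ≠ some 0 ∧ quar ≠ some 0 ∧ (minu ≠ none ∨ quar ≠ none)
instance (pupil_list : List Int) (minu : Option Int) (quar : Option Int) : Decidable (Pre_count_blink pupil_list minu quar) := by unfold Pre_count_blink; infer_instance

def pvWitness_count_blink : List Int × Option Int × Option Int := ([0, 1, 0, 0, 2, 0], none, some 2)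

def Spec_count_blink (pupil_list : List Int) (minu : Option Int) (quar : Option Int) (out : List Int × List Int) : Prop := out = count_blink_alt pupil_list minu quar
instance (pupil_list : List Int) (minu : Option Int) (quar : Option Int) (out : List Int × List Int) : Decidable (Spec_count_blink pupil_list minu quar out) := by unfold Spec_count_blink; infer_instance

-- ===== CLAIM (what is proved, stated in full; the proofs are below) =====
def Claim_equal_count_blink : Prop := ∀ (pupil_list : List Int) (minu : Option Int) (quar : Option Int), Dom_count_blink pupil_list minu quar → Pre_count_blink pupil_list minu quar → Spec_count_blink pupil_list minu quar (count_blink pupil_list minu quar)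

-- ===== LEMMAS AND PROOFS =====

-- "frame j is closed" / "frame j starts a blink" (global wrap-around j-1 indexing)
def pvZ (p : List Int) (j : Nat) : Bool := PySem.List.pyGetD p (j : Int) 1 == 0
def pvB (p : List Int) (j : Nat) : Bool :=
  (PySem.List.pyGetD p (j : Int) 1 == 0) && (PySem.List.pyGetD p ((j : Int) - 1) 0 != 0)

-- number of j in [a, b) with P j
def pvCnt (P : Nat → Bool) (a b : Nat) : Int := ((List.range' a (b - a)).countP P : Nat)

theorem pvCnt_nil (P : Nat → Bool) {a b : Nat} (h : b ≤ a) : pvCnt P a b = 0 := by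
  unfold pvCnt
  have : b - a = 0 := by omega
  simp [this]

theorem pvCnt_cons (P : Nat → Bool) {a b : Nat} (h : a < b) :
    pvCnt P a b = (if P a then 1 else 0) + pvCnt P (a + 1) b := by
  unfold pvCnt
  have h1 : b - a = (b - (a + 1)) + 1 := by omega
  rw [h1, List.range'_succ, List.countP_cons]
  cases hP : P a <;> simp [hP] <;> omega

theorem pvCnt_concat (P : Nat → Bool) {a k : Nat} (h : a ≤ k) :
    pvCnt P a (k + 1) = pvCnt P a k + (if P k then 1 else 0) := by
  unfold pvCnt
  have h1 : k + 1 - a = (k - a) + 1 := by omega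
  have h2 : a + 1 * (k - a) = k := by omega
  rw [h1, List.range'_concat, List.countP_append, h2]
  cases hP : P k <;> simp [hP]

theorem pvCnt_min_succ (P : Nat → Bool) (a b k : Nat) :
    pvCnt P a (min b (k + 1)) =
      pvCnt P a (min b k) + (if a ≤ k ∧ k < b ∧ P k = true then 1 else 0) := by
  by_cases hb : k < b
  · have h1 : min b (k + 1) = k + 1 := by omega
    have h2 : min b k = k := by omega
    rw [h1, h2]
    by_cases ha : a ≤ k
    · rw [pvCnt_concat P ha]
      cases hP : P k <;> simp [ha, hb, hP]
    · rw [pvCnt_nil P (by omega), pvCnt_nil P (by omega)]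
      simp [ha]
  · have h1 : min b (k + 1) = b := by omega
    have h2 : min b k = b := by omega
    rw [h1, h2]
    simp [hb]

-- the slice p[a:a+m] as a map of getD over its index range
theorem pvDropTake (p : List Int) (a m : Nat) :
    (p.drop a).take m = (List.range' a (min (a + m) p.length - a)).map (fun j => p.getD j 1) := by
  apply List.ext_getElem
  · simp; omega
  · intro k h1 h2
    have hk : k < min m (p.length - a) := by simpa using h1
    have hal : a + k < p.length := by omega
    simp [List.getElem_map, List.getElem_range', List.getD_eq_getElem?_getD,
      List.getElem?_eq_getElem hal]

-- A's per-chunk '.count(0)' as an index count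
theorem pvFrameA (p : List Int) (T c : Nat) :
    ((PySem.List.count (PySem.List.slice p (some ((c : Int) * (T : Int))) (some (((c : Int) + 1) * (T : Int)))) 0 : Nat) : Int)
      = pvCnt (pvZ p) (c * T) (min ((c + 1) * T) p.length) := by
  have e1 : ((c : Int)) * (T : Int) = (((c * T : Nat)) : Int) := by push_cast; ring
  have e2 : ((c : Int) + 1) * (T : Int) = ((((c + 1) * T : Nat)) : Int) := by push_cast; ring
  have hle : c * T ≤ (c + 1) * T := Nat.mul_le_mul_right T (by omega)
  have e3 : c * T + ((c + 1) * T - c * T) = (c + 1) * T := by omega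
  rw [e1, e2, PySem.List.slice_natCast, PySem.List.count_eq, List.count_eq_countP,
    pvDropTake p (c * T) ((c + 1) * T - c * T), e3, List.countP_map]
  unfold pvCnt pvZ
  congr 1
  apply List.countP_congr
  intro j hj
  have hj2 : c * T ≤ j ∧ j < p.length := by
    have := List.mem_range'.mp hj; omega
  simp [Function.comp, PySem.List.pyGetD_natCast]

-- A's break-at-len transition loop as an index count
theorem pvBlinkLoop_eq (p : List Int) :
    ∀ (n : Nat) (a b : Int), (b - a).toNat = n → 0 ≤ a → ∀ acc : Int,
      pvBlinkLoop p (PySem.List.pyRange a b 1) acc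
        = acc + pvCnt (pvB p) a.toNat (min b.toNat p.length) := by
  intro n
  induction n with
  | zero =>
    intro a b hn ha acc
    have hba : b ≤ a := by omega
    rw [PySem.List.pyRange_one_eq_nil hba]
    rw [pvCnt_nil _ (by omega)]
    simp [pvBlinkLoop]
  | succ n ih =>
    intro a b hn ha acc
    have hab : a < b := by omega
    rw [PySem.List.pyRange_one_cons hab]
    by_cases hlen : (p.length : Int) ≤ a
    · rw [pvCnt_nil _ (by omega)]
      simp [pvBlinkLoop, hlen]
    · have ha' : ((a.toNat : Int)) = a := Int.toNat_of_nonneg ha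
      have hcond : (pvB p a.toNat = true) ↔
          (PySem.List.pyGetD p a 1 = 0 ∧ PySem.List.pyGetD p (a - 1) 0 ≠ 0) := by
        simp [pvB, ha']
      rw [pvCnt_cons _ (show a.toNat < min b.toNat p.length by omega)]
      have step : pvBlinkLoop p (a :: PySem.List.pyRange (a + 1) b 1) acc
          = pvBlinkLoop p (PySem.List.pyRange (a + 1) b 1)
              (if PySem.List.pyGetD p a 1 = 0 ∧ PySem.List.pyGetD p (a - 1) 0 ≠ 0 then acc + 1 else acc) := by
        simp [pvBlinkLoop, hlen]
      rw [step, ih (a + 1) b (by omega) (by omega)]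
      have h1 : (a + 1).toNat = a.toNat + 1 := by omega
      rw [h1]
      by_cases hc : PySem.List.pyGetD p a 1 = 0 ∧ PySem.List.pyGetD p (a - 1) 0 ≠ 0
      · rw [if_pos hc, if_pos (hcond.mpr hc)]; ring
      · rw [if_neg hc, if_neg (fun h => hc (hcond.mp h))]; ring

-- A's append-accumulating outer loop is a map
theorem pvFoldA {α : Type} (f g : α → Int) (l : List α) :
    ∀ (xs ys : List Int),
      l.foldl (fun (acc : List Int × List Int) i => (acc.1 ++ [f i], acc.2 ++ [g i])) (xs, ys)
        = (xs ++ l.map f, ys ++ l.map g) := by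
  induction l with
  | nil => simp
  | cons x t ih => intro xs ys; simp [List.foldl_cons, ih]

theorem pvLtDivSucc (k T : Nat) (h : 0 < T) : k < (k / T + 1) * T := by
  have h1 : T * (k / T) + k % T = k := Nat.div_add_mod k T
  have h2 : k % T < T := Nat.mod_lt k h
  have h3 : (k / T + 1) * T = T * (k / T) + T := by ring
  linarith

theorem pvMapZero (P : Nat → Bool) (C T : Nat) :
    (List.range C).map (fun c => pvCnt P (c * T) (min ((c + 1) * T) 0)) = List.replicate C 0 := by
  apply List.eq_replicate_iff.mpr
  refine ⟨by simp, ?_⟩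
  intro b hb
  simp only [List.mem_map, List.mem_range] at hb
  obtain ⟨c, _, rfl⟩ := hb
  exact pvCnt_nil _ (by omega)

theorem pvMapStep_eq (P : Nat → Bool) (C T k : Nat) (hP : P k = false) :
    (List.range C).map (fun c => pvCnt P (c * T) (min ((c + 1) * T) (k + 1)))
      = (List.range C).map (fun c => pvCnt P (c * T) (min ((c + 1) * T) k)) := by
  apply List.map_congr_left
  intro c _
  rw [pvCnt_min_succ]
  simp [hP]

theorem pvMapStep_mod (P : Nat → Bool) (C T k : Nat) (hT : 0 < T) (hkC : k < C * T) (hP : P k = true) :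
    (List.range C).map (fun c => pvCnt P (c * T) (min ((c + 1) * T) (k + 1)))
      = ((List.range C).map (fun c => pvCnt P (c * T) (min ((c + 1) * T) k))).modify (k / T) (· + 1) := by
  apply List.ext_getElem
  · simp
  · intro j hj1 hj2
    have hjC : j < C := by simpa using hj1
    rw [List.getElem_modify]
    simp only [List.getElem_map, List.getElem_range]
    rw [pvCnt_min_succ]
    by_cases hj : k / T = j
    · subst hj
      have hb1 : k / T * T ≤ k := Nat.div_mul_le_self k T
      have hb2 : k < (k / T + 1) * T := pvLtDivSucc k T hT
      simp [hb1, hb2, hP]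
    · have hcond : ¬ (j * T ≤ k ∧ k < (j + 1) * T ∧ P k = true) := by
        intro hcc
        exact hj (Nat.div_eq_of_lt_le hcc.1 hcc.2.1)
      rw [if_neg hcond, if_neg hj]
      simp

-- B's single-pass fold invariant
theorem pvFoldB (p : List Int) (time : Int) (C : Nat) (hC : 0 < C)
    (lim : Nat) (hlen : lim ≤ p.length) (hlim : lim ≤ C * time.toNat) (htime : time = (time.toNat : Int)) :
    ∀ (k : Nat), k ≤ lim →
      (List.range k).foldl
        (fun (acc : List Int × List Int) (idx : Nat) =>
          if PySem.List.pyGetD p (idx : Int) 1 = 0 then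
            let c := (PySem.Int.floordiv (idx : Int) time).toNat
            if PySem.List.pyGetD p ((idx : Int) - 1) 0 ≠ 0 then
              (acc.1.modify c (· + 1), acc.2.modify c (· + 1))
            else
              (acc.1.modify c (· + 1), acc.2)
          else acc)
        (List.replicate C 0, List.replicate C 0)
      = ((List.range C).map (fun c => pvCnt (pvZ p) (c * time.toNat) (min ((c + 1) * time.toNat) k)),
         (List.range C).map (fun c => pvCnt (pvB p) (c * time.toNat) (min ((c + 1) * time.toNat) k))) := by
  intro k
  induction k with
  | zero =>
    intro _
    simp only [List.range_zero, List.foldl_nil]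
    rw [pvMapZero (pvZ p) C time.toNat, pvMapZero (pvB p) C time.toNat]
  | succ k ih =>
    intro hk1
    rw [List.range_succ, List.foldl_append, ih (by omega)]
    simp only [List.foldl_cons, List.foldl_nil]
    have hT : 0 < time.toNat := by
      rcases Nat.eq_zero_or_pos time.toNat with h0 | h
      · rw [h0, Nat.mul_zero] at hlim; omega
      · exact h
    have hkl : k < p.length := by omega
    have hkCT : k < C * time.toNat := by omega
    have hfd : (PySem.Int.floordiv (k : Int) time).toNat = k / time.toNat := by
      conv_lhs => rw [htime]
      rw [PySem.Int.floordiv_natCast]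
      exact Int.toNat_natCast _
    by_cases hz : PySem.List.pyGetD p (k : Int) 1 = 0
    · have hzB : pvZ p k = true := by unfold pvZ; rw [hz]; rfl
      by_cases hprev : PySem.List.pyGetD p ((k : Int) - 1) 0 ≠ 0
      · have hbB : pvB p k = true := by
          unfold pvB
          rw [hz]
          simp only [beq_self_eq_true, Bool.true_and, bne_iff_ne]
          exact hprev
        rw [if_pos hz]
        simp only [if_pos hprev]
        rw [pvMapStep_mod (pvZ p) C time.toNat k hT hkCT hzB,
            pvMapStep_mod (pvB p) C time.toNat k hT hkCT hbB, hfd]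
      · have hbB : pvB p k = false := by
          push_neg at hprev
          unfold pvB
          rw [hprev]
          simp
        rw [if_pos hz]
        simp only [if_neg hprev]
        rw [pvMapStep_mod (pvZ p) C time.toNat k hT hkCT hzB,
            pvMapStep_eq (pvB p) C time.toNat k hbB, hfd]
    · have hbeq : (PySem.List.pyGetD p (k : Int) 1 == 0) = false := beq_eq_false_iff_ne.mpr hz
      have hzB : pvZ p k = false := by unfold pvZ; rw [hbeq]
      have hbB : pvB p k = false := by unfold pvB; rw [hbeq]; simp
      rw [if_neg hz, pvMapStep_eq (pvZ p) C time.toNat k hzB,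
          pvMapStep_eq (pvB p) C time.toNat k hbB]

theorem pvSetup_time_nonneg {n t c : Int} (hn : 0 ≤ n) {minu quar : Option Int}
    (h : pvSetup n minu quar = some (t, c)) (hc : 1 ≤ c) : 0 ≤ t := by
  cases minu with
  | none =>
    cases quar with
    | none => simp [pvSetup] at h
    | some q =>
      simp only [pvSetup] at h
      split_ifs at h with hq
      simp only [Option.some.injEq, Prod.mk.injEq] at h
      obtain ⟨ht, hcq⟩ := h
      subst ht; subst hcq
      rw [PySem.Int.floordiv_eq_ediv_of_pos (by omega)]
      exact Int.ediv_nonneg hn (by omega)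
  | some m =>
    cases quar with
    | none =>
      simp only [pvSetup] at h
      split_ifs at h with hm
      simp only [Option.some.injEq, Prod.mk.injEq] at h
      obtain ⟨ht, hcq⟩ := h
      subst ht
      by_contra hneg
      have hmt : m * 1800 < 0 := by omega
      have h1 := PySem.Int.floordiv_mul_add_mod n (m * 1800)
      have h2 := PySem.Int.mod_neg_bounds n hmt
      rw [← hcq] at hc
      nlinarith [h1, h2.2, hc, hmt, hn]
    | some q =>
      simp only [pvSetup] at h
      split_ifs at h with hm hq
      simp only [Option.some.injEq, Prod.mk.injEq] at h
      obtain ⟨ht, hcq⟩ := h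
      subst ht; subst hcq
      rw [PySem.Int.floordiv_eq_ediv_of_pos (by omega)]
      exact Int.ediv_nonneg hn (by omega)


theorem pvSetup_ne_none {p : List Int} {minu quar : Option Int}
    (h : Pre_count_blink p minu quar) : pvSetup ((p.length : Nat) : Int) minu quar ≠ none := by
  obtain ⟨h1, h2, h3⟩ := h
  cases minu with
  | none =>
    cases quar with
    | none => simp at h3
    | some q =>
      have hq : q ≠ 0 := by simpa using h2
      simp [pvSetup, hq]
  | some m =>
    have hm : m ≠ 0 := by simpa using h1
    have hm' : ¬ (m * 1800 = 0) := by intro hh; exact hm (by omega)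
    cases quar with
    | none => simp [pvSetup, hm']
    | some q =>
      have hq : q ≠ 0 := by simpa using h2
      simp [pvSetup, hm', hq]

-- ===== VERDICT (by name: the statement is the Claim_ definition above) =====
theorem count_blink_spec : Claim_equal_count_blink := by
  intro p minu quar _ hpre
  unfold Spec_count_blink count_blink count_blink_alt
  rcases hsome : pvSetup ((p.length : Nat) : Int) minu quar with _ | ⟨time, chunk⟩
  · exact absurd hsome (pvSetup_ne_none hpre)
  · by_cases hch : chunk < 1
    · simp only [if_pos hch]
      rw [PySem.List.pyRange_one_eq_nil (show chunk ≤ 0 by omega)]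
      simp
    · simp only [if_neg hch]
      have hc1 : 1 ≤ chunk := by omega
      have ht0 : 0 ≤ time := pvSetup_time_nonneg (Int.natCast_nonneg _) hsome hc1
      have htime : time = (time.toNat : Int) := (Int.toNat_of_nonneg ht0).symm
      set T := time.toNat with hTdef
      set C := chunk.toNat with hCdef
      have hchunk : chunk = (C : Int) := (Int.toNat_of_nonneg (by omega)).symm
      have hC : 0 < C := by omega
      set lim : Nat := min p.length (C * T) with hlimdef
      have hCT : ((C : Int) * (T : Int)) = ((C * T : Nat) : Int) := by push_cast; ring
      have hlimit : (min ((p.length : Nat) : Int) (chunk * time)).toNat = lim := by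
        rw [hchunk]
        conv_lhs => rw [htime]
        rw [hCT, hlimdef]
        omega
      have hA := pvFoldA
        (fun i : Int => ((PySem.List.count (PySem.List.slice p (some (i * time)) (some ((i + 1) * time))) 0 : Nat) : Int))
        (fun i : Int => pvBlinkLoop p (PySem.List.pyRange (time * i) (time * (i + 1)) 1) 0)
        (PySem.List.pyRange 0 chunk 1) [] []
      simp only [List.nil_append] at hA
      refine hA.trans ?_
      have hB := pvFoldB p time C hC lim (by rw [hlimdef]; exact Nat.min_le_left _ _) (by rw [hlimdef]; exact Nat.min_le_right _ _) htime lim le_rfl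
      rw [hlimit]
      refine Eq.trans ?_ hB.symm
      rw [hchunk, PySem.List.pyRange_zero_natCast, List.map_map, List.map_map]
      refine Prod.ext ?_ ?_ <;> apply List.map_congr_left <;> intro c hcmem
      · have hcC : c < C := List.mem_range.mp hcmem
        have h5 : (c + 1) * T ≤ C * T := Nat.mul_le_mul_right T (by omega)
        have h6 : min ((c + 1) * T) p.length = min ((c + 1) * T) lim := by
          rw [hlimdef, show min p.length (C * T) = min (C * T) p.length from Nat.min_comm _ _,
            ← Nat.min_assoc, Nat.min_eq_left h5]
        have hfa := pvFrameA p T c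
        simp only [Function.comp]
        conv_lhs => rw [htime]
        rw [hfa, h6]
      · have hcC : c < C := List.mem_range.mp hcmem
        have h5 : (c + 1) * T ≤ C * T := Nat.mul_le_mul_right T (by omega)
        have h6 : min ((c + 1) * T) p.length = min ((c + 1) * T) lim := by
          rw [hlimdef, show min p.length (C * T) = min (C * T) p.length from Nat.min_comm _ _,
            ← Nat.min_assoc, Nat.min_eq_left h5]
        simp only [Function.comp]
        have ha0 : (0 : Int) ≤ time * (c : Int) := mul_nonneg ht0 (Int.natCast_nonneg _)
        have hbl := pvBlinkLoop_eq p ((time * ((c : Int) + 1) - time * (c : Int)).toNat)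
          (time * (c : Int)) (time * ((c : Int) + 1)) rfl ha0 0
        rw [hbl, zero_add]
        have e1 : (time * (c : Int)).toNat = c * T := by
          conv_lhs => rw [htime]
          rw [show ((T : Int)) * (c : Int) = ((T * c : Nat) : Int) from by push_cast; ring]
          rw [Int.toNat_natCast, Nat.mul_comm]
        have e2 : (time * ((c : Int) + 1)).toNat = (c + 1) * T := by
          conv_lhs => rw [htime]
          rw [show ((T : Int)) * ((c : Int) + 1) = (((c + 1) * T : Nat) : Int) from by push_cast; ring]
          rw [Int.toNat_natCast]
        rw [e1, e2, h6]
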